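-- pv_equiv track=rewrite | github.com/beaverulf/aoc2023 | day5/test.py | minloc
-- ===== SOURCE A (Python) =====
-- def minloc(seeds: list[int], maps: list[list[tuple[int, int, int]]]):
--     sol = seeds[0]
--     for seed in seeds:
--         for _map in maps:
--             for dest, source, length in _map:
--                 if source <= seed < source + length:
--                     seed += -source + dest
--                     break
--         sol = sol if sol < seed else seed
--     return sol
-- ===== SOURCE B (Python) =====
-- def _bisect_right(keys, v):
--     # hand-written bisect.bisect_right (plain Python, no imports)
--     lo, hi = 0, len(keys)
--     while lo < hi:
--         mid = (lo + hi) // 2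
--         if v < keys[mid]:
--             hi = mid
--         else:
--             lo = mid + 1
--     return lo
--
--
-- def _flatten(m):
--     # Turn a map's (possibly overlapping) ranges into DISJOINT pieces that honour
--     # first-match priority: each range only claims the part of its source interval
--     # not already claimed by an earlier range.
--     pieces = []
--     for d, s, l in m:
--         if l <= 0:
--             continue
--         segs = [(s, s + l)]
--         for pd, ps, pl in pieces:
--             lo, hi = ps, ps + pl
--             new = []
--             for a, b in segs:
--                 if hi <= a or b <= lo:
--                     new.append((a, b))
--                 else:
--                     if a < lo:
--                         new.append((a, lo))
--                     if hi < b: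
--                         new.append((hi, b))
--             segs = new
--         for a, b in segs:
--             pieces.append((d + (a - s), a, b - a))
--     return pieces
--
--
-- def minloc(seeds, maps):
--     # Preprocess each map once into sorted disjoint pieces; each lookup is then a
--     # binary search for the piece with the largest source <= v.
--     tables = []
--     for m in maps:
--         rs = sorted(_flatten(m), key=lambda t: t[1])
--         tables.append((rs, [t[1] for t in rs]))
--     best = seeds[0]
--     for v in seeds:
--         for rs, keys in tables:
--             i = _bisect_right(keys, v) - 1
--             if i >= 0:
--                 d, s, l = rs[i]
--                 if v < s + l:
--                     v += d - s
--         if v < best: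
--             best = v
--     return best
-- ===== Notes on version B (the rewrite author's own statement) =====
-- stated objective: alternative
-- what changed: B preprocesses each map once, flattening its (possibly overlapping) ranges into disjoint pieces that honour first-match priority and sorting them by source, so each lookup becomes a hand-written binary search for the containing piece instead of A's linear first-match scan over every range for every seed and map.
import Mathlib
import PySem

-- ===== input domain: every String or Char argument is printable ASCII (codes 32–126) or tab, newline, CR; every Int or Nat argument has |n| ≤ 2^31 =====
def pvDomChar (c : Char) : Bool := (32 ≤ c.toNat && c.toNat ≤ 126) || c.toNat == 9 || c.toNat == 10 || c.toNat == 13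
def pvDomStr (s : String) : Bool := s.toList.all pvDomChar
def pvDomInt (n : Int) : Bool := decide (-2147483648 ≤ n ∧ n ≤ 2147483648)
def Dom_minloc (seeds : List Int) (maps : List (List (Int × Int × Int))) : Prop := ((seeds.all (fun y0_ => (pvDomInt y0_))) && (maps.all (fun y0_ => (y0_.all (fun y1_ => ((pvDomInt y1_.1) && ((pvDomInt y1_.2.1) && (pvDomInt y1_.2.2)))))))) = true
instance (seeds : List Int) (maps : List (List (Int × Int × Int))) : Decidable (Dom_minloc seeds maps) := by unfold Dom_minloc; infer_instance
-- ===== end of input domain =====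

-- B preprocesses each map once — flattening its (possibly overlapping) ranges into disjoint
-- first-match-priority pieces sorted by source — and looks values up by binary search,
-- instead of A's linear first-match scan over every range for every seed and map.


-- ===== PORT A =====
-- inner 'for dest, source, length in _map: if source <= seed < source+length: seed += -source+dest; break'
def stepA : List (Int × Int × Int) → Int → Int
  | [], seed => seed
  | (dest, source, length) :: rest, seed =>
      if source ≤ seed ∧ seed < source + length then seed + (-source + dest)
      else stepA rest seed

def minloc (seeds : List Int) (maps : List (List (Int × Int × Int))) : Int :=
  match PySem.List.pyGet? seeds 0 with
  | none => 0  -- Python raises IndexError here; excluded by Pre_minloc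
  | some sol0 =>
      seeds.foldl (fun sol seed0 =>
        let seed := maps.foldl (fun seed m => stepA m seed) seed0
        if sol < seed then sol else seed) sol0

-- ===== PORT B =====
-- inner loop of _flatten: subtract one claimed piece from the still-unclaimed segments
def subPiece (segs : List (Int × Int)) (p : Int × Int × Int) : List (Int × Int) :=
  segs.foldl (fun new ab =>
    if p.2.1 + p.2.2 ≤ ab.1 ∨ ab.2 ≤ p.2.1 then new ++ [ab]
    else (if ab.1 < p.2.1 then new ++ [(ab.1, p.2.1)] else new) ++
         (if p.2.1 + p.2.2 < ab.2 then [(p.2.1 + p.2.2, ab.2)] else [])) []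

-- one iteration of _flatten's outer loop ('continue' on l <= 0)
def addRange (pieces : List (Int × Int × Int)) (t : Int × Int × Int) : List (Int × Int × Int) :=
  if t.2.2 ≤ 0 then pieces
  else
    let segs := pieces.foldl subPiece [(t.2.1, t.2.1 + t.2.2)]
    pieces ++ segs.map (fun ab => (t.1 + (ab.1 - t.2.1), ab.1, ab.2 - ab.1))

def flatten (m : List (Int × Int × Int)) : List (Int × Int × Int) := m.foldl addRange []

-- hand-written _bisect_right: 'while lo < hi: mid = (lo+hi)//2; …'  (keys[mid] is always in
-- range: 0 ≤ lo ≤ mid < hi ≤ len(keys), so getD is exact)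
def bisectGo (keys : List Int) (v : Int) (lo hi : Nat) : Nat :=
  if h : lo < hi then
    let mid := (lo + hi) / 2
    if v < keys.getD mid 0 then bisectGo keys v lo mid
    else bisectGo keys v (mid + 1) hi
  else lo
termination_by hi - lo
decreasing_by all_goals omega

def bisectR (keys : List Int) (v : Int) : Nat := bisectGo keys v 0 keys.length

-- 'i = _bisect_right(keys,v)-1; if i >= 0: d,s,l = rs[i]; if v < s+l: v += d-s'
-- (rs[i] is in range whenever i ≥ 0, since bisect returns ≤ len; getD is exact)
def lookupB (rs : List (Int × Int × Int)) (keys : List Int) (v : Int) : Int :=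
  let i : Int := (bisectR keys v : Int) - 1
  if 0 ≤ i then
    let t := rs.getD i.toNat (0, 0, 0)
    if v < t.2.1 + t.2.2 then v + (t.1 - t.2.1) else v
  else v

-- table built once per map: (flattened pieces sorted by source, their sources)
def tableB (pieces : List (Int × Int × Int)) : List (Int × Int × Int) × List Int :=
  let rs := PySem.List.sorted pieces (fun t => t.2.1)
  (rs, rs.map (fun t => t.2.1))

def minloc_alt (seeds : List Int) (maps : List (List (Int × Int × Int))) : Int :=
  let tables := maps.map (fun m => tableB (flatten m))
  match PySem.List.pyGet? seeds 0 with
  | none => 0  -- Python raises IndexError here; excluded by Pre_minloc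
  | some best0 =>
      seeds.foldl (fun best v0 =>
        let v := tables.foldl (fun v tb => lookupB tb.1 tb.2 v) v0
        if v < best then v else best) best0

-- ===== PRECONDITION & SPEC =====
-- Pre_ excludes only empty seeds, where both Pythons raise IndexError on seeds[0].
def Pre_minloc (seeds : List Int) (maps : List (List (Int × Int × Int))) : Prop := seeds ≠ []
instance (seeds : List Int) (maps : List (List (Int × Int × Int))) : Decidable (Pre_minloc seeds maps) := by unfold Pre_minloc; infer_instance

def pvWitness_minloc : List Int × (List (List (Int × Int × Int))) :=
  ([79, 14], [[(50, 98, 2), (52, 50, 48)]])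

def Spec_minloc (seeds : List Int) (maps : List (List (Int × Int × Int))) (out : Int) : Prop := out = minloc_alt seeds maps
instance (seeds : List Int) (maps : List (List (Int × Int × Int))) (out : Int) : Decidable (Spec_minloc seeds maps out) := by unfold Spec_minloc; infer_instance

-- ===== CLAIM (what is proved, stated in full; the proofs are below) =====
def Claim_equal_minloc : Prop := ∀ (seeds : List Int) (maps : List (List (Int × Int × Int))), Dom_minloc seeds maps → Pre_minloc seeds maps → Spec_minloc seeds maps (minloc seeds maps)

-- ===== LEMMAS AND PROOFS =====

-- v is matched by tuple t (the condition of A's inner if)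
abbrev ContV (v : Int) (t : Int × Int × Int) : Prop := t.2.1 ≤ v ∧ v < t.2.1 + t.2.2

-- pieces invariant: positive lengths, pairwise disjoint source intervals
def PiecesGood (pieces : List (Int × Int × Int)) : Prop :=
  (∀ p ∈ pieces, 0 < p.2.2) ∧
  List.Pairwise (fun a b => a.2.1 + a.2.2 ≤ b.2.1 ∨ b.2.1 + b.2.2 ≤ a.2.1) pieces

-- what one claimed piece leaves of one unclaimed segment
def segPieces (p : Int × Int × Int) (ab : Int × Int) : List (Int × Int) :=
  if p.2.1 + p.2.2 ≤ ab.1 ∨ ab.2 ≤ p.2.1 then [ab]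
  else (if ab.1 < p.2.1 then [(ab.1, p.2.1)] else []) ++
       (if p.2.1 + p.2.2 < ab.2 then [(p.2.1 + p.2.2, ab.2)] else [])

-- segment-list invariant for the inner subtraction loop: segments are the part of [s,e)
-- not claimed by any piece of Q, disjoint, in bounds
def SegsGood (s e : Int) (Q : List (Int × Int × Int)) (segs : List (Int × Int)) : Prop :=
  (∀ ab ∈ segs, ab.1 < ab.2 ∧ s ≤ ab.1 ∧ ab.2 ≤ e) ∧
  List.Pairwise (fun x y => x.2 ≤ y.1 ∨ y.2 ≤ x.1) segs ∧
  (∀ ab ∈ segs, ∀ p ∈ Q, p.2.1 + p.2.2 ≤ ab.1 ∨ ab.2 ≤ p.2.1) ∧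
  (∀ w : Int, (∃ ab ∈ segs, ab.1 ≤ w ∧ w < ab.2) ↔
    (s ≤ w ∧ w < e ∧ ∀ p ∈ Q, ¬ ContV w p))

theorem stepA_eq_find (xs : List (Int × Int × Int)) (v : Int) :
    stepA xs v =
      match xs.find? (fun t => decide (ContV v t)) with
      | some t => v + (-t.2.1 + t.1)
      | none => v := by
  induction xs with
  | nil => simp [stepA]
  | cons t rest ih =>
      obtain ⟨d, s, l⟩ := t
      by_cases hc : s ≤ v ∧ v < s + l
      · simp [stepA, hc, List.find?, ContV]
      · simpa [stepA, hc, List.find?, ContV] using ih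

theorem stepA_append_no_match (xs ys : List (Int × Int × Int)) (v : Int)
    (h : ∀ t ∈ xs, ¬ ContV v t) : stepA (xs ++ ys) v = stepA ys v := by
  induction xs with
  | nil => simp
  | cons t rest ih =>
      obtain ⟨d, s, l⟩ := t
      have hnc := h (d, s, l) (List.mem_cons_self ..)
      simp only [ContV] at hnc
      simp only [List.cons_append, stepA, if_neg hnc]
      exact ih (fun t' ht' => h t' (List.mem_cons_of_mem _ ht'))

theorem stepA_append_match (xs ys : List (Int × Int × Int)) (v : Int)
    (h : ∃ t ∈ xs, ContV v t) : stepA (xs ++ ys) v = stepA xs v := by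
  induction xs with
  | nil => simp at h
  | cons t rest ih =>
      obtain ⟨d, s, l⟩ := t
      by_cases hc : s ≤ v ∧ v < s + l
      · simp only [List.cons_append, stepA, if_pos hc]
      · simp only [List.cons_append, stepA, if_neg hc]
        apply ih
        rcases h with ⟨t', ht', hc'⟩
        rcases List.mem_cons.mp ht' with rfl | hmem
        · exact absurd hc' hc
        · exact ⟨t', hmem, hc'⟩

theorem stepA_append_congr (xs xs' r : List (Int × Int × Int)) (v : Int)
    (hcov : ∀ w : Int, (∃ t ∈ xs, ContV w t) ↔ (∃ t ∈ xs', ContV w t))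
    (hsem : ∀ w : Int, stepA xs w = stepA xs' w) :
    stepA (xs ++ r) v = stepA (xs' ++ r) v := by
  by_cases h : ∃ t ∈ xs, ContV v t
  · rw [stepA_append_match xs r v h, stepA_append_match xs' r v ((hcov v).mp h), hsem]
  · have h' : ¬ ∃ t ∈ xs', ContV v t := fun hx => h ((hcov v).mpr hx)
    rw [stepA_append_no_match xs r v (by push_neg at h; exact fun t ht hc => (h t ht) hc),
        stepA_append_no_match xs' r v (by push_neg at h'; exact fun t ht hc => (h' t ht) hc)]

-- the inner foldl of subPiece is a flatMap of segPieces
theorem subPiece_eq_flatMap (segs : List (Int × Int)) (p : Int × Int × Int) :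
    subPiece segs p = segs.flatMap (segPieces p) := by
  have hgen : ∀ (l : List (Int × Int)) (acc : List (Int × Int)),
      l.foldl (fun new ab =>
        if p.2.1 + p.2.2 ≤ ab.1 ∨ ab.2 ≤ p.2.1 then new ++ [ab]
        else (if ab.1 < p.2.1 then new ++ [(ab.1, p.2.1)] else new) ++
             (if p.2.1 + p.2.2 < ab.2 then [(p.2.1 + p.2.2, ab.2)] else [])) acc
      = acc ++ l.flatMap (segPieces p) := by
    intro l
    induction l with
    | nil => intro acc; simp
    | cons ab rest ih =>
        intro acc
        simp only [List.foldl_cons, List.flatMap_cons, ih]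
        rw [← List.append_assoc]
        congr 1
        unfold segPieces
        split_ifs <;> simp
  exact hgen segs []

theorem segPieces_cover (p : Int × Int × Int) (ab : Int × Int) (w : Int) :
    (∃ cd ∈ segPieces p ab, cd.1 ≤ w ∧ w < cd.2) ↔
    ((ab.1 ≤ w ∧ w < ab.2) ∧ ¬ (p.2.1 ≤ w ∧ w < p.2.1 + p.2.2)) := by
  unfold segPieces
  split_ifs <;>
    simp only [List.mem_append, List.mem_cons, List.not_mem_nil,
      or_false, List.nil_append, List.append_nil] <;>
    constructor
  · rintro ⟨cd, rfl, hw⟩; exact ⟨hw, by omega⟩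
  · rintro ⟨hw, hn⟩; exact ⟨ab, rfl, hw⟩
  · rintro ⟨cd, rfl | rfl, hw⟩ <;> simp_all <;> omega
  · rintro ⟨hw, hn⟩
    by_cases hlo : w < p.2.1
    · exact ⟨(ab.1, p.2.1), Or.inl rfl, by simp; omega⟩
    · exact ⟨(p.2.1 + p.2.2, ab.2), Or.inr rfl, by simp; omega⟩
  · rintro ⟨cd, rfl, hw⟩; simp_all; omega
  · rintro ⟨hw, hn⟩; exact ⟨(ab.1, p.2.1), rfl, by simp; omega⟩
  · rintro ⟨cd, rfl, hw⟩; simp_all; omega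
  · rintro ⟨hw, hn⟩; exact ⟨(p.2.1 + p.2.2, ab.2), rfl, by simp; omega⟩
  · rintro ⟨cd, h, hw⟩; simp_all
  · rintro ⟨hw, hn⟩; omega

theorem segPieces_bounds (p : Int × Int × Int) (ab : Int × Int) (hab : ab.1 < ab.2) :
    ∀ cd ∈ segPieces p ab, ab.1 ≤ cd.1 ∧ cd.1 < cd.2 ∧ cd.2 ≤ ab.2 := by
  obtain ⟨a1, a2⟩ := ab
  intro cd hcd
  obtain ⟨c1, c2⟩ := cd
  unfold segPieces at hcd
  split_ifs at hcd <;> simp_all <;> omega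

theorem segPieces_avoid (p : Int × Int × Int) (ab : Int × Int) :
    ∀ cd ∈ segPieces p ab, p.2.1 + p.2.2 ≤ cd.1 ∨ cd.2 ≤ p.2.1 := by
  obtain ⟨a1, a2⟩ := ab
  intro cd hcd
  obtain ⟨c1, c2⟩ := cd
  unfold segPieces at hcd
  split_ifs at hcd <;> simp_all <;> omega

theorem segPieces_sub (p : Int × Int × Int) (ab : Int × Int) :
    ∀ cd ∈ segPieces p ab, ab.1 ≤ cd.1 ∧ cd.2 ≤ ab.2 := by
  obtain ⟨a1, a2⟩ := ab
  intro cd hcd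
  obtain ⟨c1, c2⟩ := cd
  unfold segPieces at hcd
  split_ifs at hcd <;> simp_all <;> omega

theorem segPieces_pairwise (p : Int × Int × Int) (ab : Int × Int) (hp : 0 < p.2.2) :
    List.Pairwise (fun x y => x.2 ≤ y.1 ∨ y.2 ≤ x.1) (segPieces p ab) := by
  unfold segPieces
  split_ifs <;> simp <;> omega

theorem segsGood_step (s e : Int) (Q : List (Int × Int × Int)) (segs : List (Int × Int))
    (p : Int × Int × Int) (hp : 0 < p.2.2) (h : SegsGood s e Q segs) :
    SegsGood s e (p :: Q) (subPiece segs p) := by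
  obtain ⟨hb, hpw, hav, hcov⟩ := h
  rw [subPiece_eq_flatMap]
  refine ⟨?_, ?_, ?_, ?_⟩
  · intro cd hcd
    obtain ⟨ab, hab, hmem⟩ := List.mem_flatMap.mp hcd
    have h1 := hb ab hab
    have h2 := segPieces_bounds p ab h1.1 cd hmem
    exact ⟨h2.2.1, by omega, by omega⟩
  · refine List.pairwise_flatMap.mpr ⟨fun ab hab => segPieces_pairwise p ab hp, ?_⟩
    refine hpw.imp ?_
    intro x y hxy cd hcd ef hef
    have hx := segPieces_sub p x cd hcd
    have hy := segPieces_sub p y ef hef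
    omega
  · intro cd hcd q hq
    obtain ⟨ab, hab, hmem⟩ := List.mem_flatMap.mp hcd
    rcases List.mem_cons.mp hq with rfl | hq'
    · exact segPieces_avoid q ab cd hmem
    · have h1 := hb ab hab
      have h2 := segPieces_bounds p ab h1.1 cd hmem
      have h3 := hav ab hab q hq'
      omega
  · intro w
    constructor
    · rintro ⟨cd, hcd, hw⟩
      obtain ⟨ab, hab, hmem⟩ := List.mem_flatMap.mp hcd
      have h2 := (segPieces_cover p ab w).mp ⟨cd, hmem, hw⟩
      have h3 := (hcov w).mp ⟨ab, hab, h2.1⟩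
      refine ⟨h3.1, h3.2.1, ?_⟩
      intro q hq
      rcases List.mem_cons.mp hq with rfl | hq'
      · exact h2.2
      · exact h3.2.2 q hq'
    · rintro ⟨hsw, hwe, hnone⟩
      have h3 := (hcov w).mpr ⟨hsw, hwe, fun q hq => hnone q (List.mem_cons_of_mem _ hq)⟩
      obtain ⟨ab, hab, hw⟩ := h3
      have h2 := (segPieces_cover p ab w).mpr ⟨hw, hnone p (List.mem_cons_self ..)⟩
      obtain ⟨cd, hcd, hw'⟩ := h2
      exact ⟨cd, List.mem_flatMap.mpr ⟨ab, hab, hcd⟩, hw'⟩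

theorem segsGood_congr (s e : Int) (Q Q' : List (Int × Int × Int)) (segs : List (Int × Int))
    (hQ : ∀ x, x ∈ Q ↔ x ∈ Q') (h : SegsGood s e Q segs) : SegsGood s e Q' segs := by
  obtain ⟨hb, hpw, hav, hcov⟩ := h
  refine ⟨hb, hpw, fun ab hab q hq => hav ab hab q ((hQ q).mpr hq), fun w => ?_⟩
  rw [hcov w]
  constructor
  · rintro ⟨h1, h2, h3⟩; exact ⟨h1, h2, fun q hq => h3 q ((hQ q).mpr hq)⟩
  · rintro ⟨h1, h2, h3⟩; exact ⟨h1, h2, fun q hq => h3 q ((hQ q).mp hq)⟩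

theorem segsGood_fold (s e : Int) :
    ∀ (ps : List (Int × Int × Int)) (segs : List (Int × Int)) (Q : List (Int × Int × Int)),
    (∀ p ∈ ps, (0 : Int) < p.2.2) →
    SegsGood s e Q segs → SegsGood s e (ps ++ Q) (ps.foldl subPiece segs) := by
  intro ps
  induction ps with
  | nil => intro segs Q _ h; simpa using h
  | cons p rest ih =>
      intro segs Q hpos h
      simp only [List.foldl_cons, List.cons_append]
      have h1 := ih (subPiece segs p) (p :: Q)
        (fun q hq => hpos q (List.mem_cons_of_mem _ hq))
        (segsGood_step s e Q segs p (hpos p (List.mem_cons_self ..)) h)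
      exact segsGood_congr s e _ _ _ (fun x => by simp; tauto) h1

theorem addRange_good (pieces : List (Int × Int × Int)) (t : Int × Int × Int)
    (h : PiecesGood pieces) : PiecesGood (addRange pieces t) := by
  unfold addRange
  by_cases hl : t.2.2 ≤ 0
  · rw [if_pos hl]; exact h
  · rw [if_neg hl]
    have hinit : SegsGood t.2.1 (t.2.1 + t.2.2) [] [(t.2.1, t.2.1 + t.2.2)] := by
      refine ⟨?_, ?_, ?_, ?_⟩
      · intro ab hab; simp at hab; subst hab; refine ⟨by omega, by omega, by omega⟩
      · simp
      · intro ab hab p hp; simp at hp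
      · intro w; simp
    have hsg := segsGood_fold t.2.1 (t.2.1 + t.2.2) pieces [(t.2.1, t.2.1 + t.2.2)] [] h.1 hinit
    rw [List.append_nil] at hsg
    obtain ⟨hb, hpw, hav, hcov⟩ := hsg
    constructor
    · intro p hp
      rcases List.mem_append.mp hp with hp | hp
      · exact h.1 p hp
      · obtain ⟨ab, hab, rfl⟩ := List.mem_map.mp hp
        have := hb ab hab
        simp
        omega
    · rw [List.pairwise_append]
      refine ⟨h.2, ?_, ?_⟩
      · rw [List.pairwise_map]
        exact hpw.imp (fun hxy => by simp; omega)
      · intro p hp q hq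
        obtain ⟨ab, hab, rfl⟩ := List.mem_map.mp hq
        have := hav ab hab p hp
        simp
        omega

theorem addRange_cover (pieces : List (Int × Int × Int)) (t : Int × Int × Int)
    (h : PiecesGood pieces) (w : Int) :
    (∃ q ∈ addRange pieces t, ContV w q) ↔ (∃ q ∈ pieces ++ [t], ContV w q) := by
  unfold addRange
  by_cases hl : t.2.2 ≤ 0
  · rw [if_pos hl]
    constructor
    · rintro ⟨q, hq, hc⟩; exact ⟨q, List.mem_append_left _ hq, hc⟩
    · rintro ⟨q, hq, hc⟩
      rcases List.mem_append.mp hq with h1 | h1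
      · exact ⟨q, h1, hc⟩
      · simp at h1
        rw [h1] at hc
        obtain ⟨hc1, hc2⟩ := hc
        omega
  · rw [if_neg hl]
    have hinit : SegsGood t.2.1 (t.2.1 + t.2.2) [] [(t.2.1, t.2.1 + t.2.2)] := by
      refine ⟨?_, ?_, ?_, ?_⟩
      · intro ab hab; simp at hab; subst hab; refine ⟨by omega, by omega, by omega⟩
      · simp
      · intro ab hab p hp; simp at hp
      · intro w; simp
    have hsg := segsGood_fold t.2.1 (t.2.1 + t.2.2) pieces [(t.2.1, t.2.1 + t.2.2)] [] h.1 hinit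
    rw [List.append_nil] at hsg
    obtain ⟨hb, hpw, hav, hcov⟩ := hsg
    constructor
    · rintro ⟨q, hq, hc⟩
      rcases List.mem_append.mp hq with h1 | h1
      · exact ⟨q, List.mem_append_left _ h1, hc⟩
      · obtain ⟨ab, hab, rfl⟩ := List.mem_map.mp h1
        obtain ⟨hc1, hc2⟩ := hc
        simp only [] at hc1 hc2
        have hcv := (hcov w).mp ⟨ab, hab, by constructor <;> omega⟩
        refine ⟨t, List.mem_append_right _ (by simp), hcv.1, hcv.2.1⟩
    · rintro ⟨q, hq, hc⟩
      rcases List.mem_append.mp hq with h1 | h1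
      · exact ⟨q, List.mem_append_left _ h1, hc⟩
      · simp at h1
        rw [h1] at hc
        by_cases hA : ∃ p ∈ pieces, ContV w p
        · obtain ⟨p, hp, hcp⟩ := hA
          exact ⟨p, List.mem_append_left _ hp, hcp⟩
        · push_neg at hA
          have hex := (hcov w).mpr ⟨hc.1, hc.2, fun p hp => hA p hp⟩
          obtain ⟨ab, hab, hw⟩ := hex
          refine ⟨(t.1 + (ab.1 - t.2.1), ab.1, ab.2 - ab.1),
            List.mem_append_right _ (List.mem_map.mpr ⟨ab, hab, rfl⟩), ?_, ?_⟩
          · exact hw.1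
          · simp
            omega

theorem addRange_sem (pieces : List (Int × Int × Int)) (t : Int × Int × Int)
    (h : PiecesGood pieces) (v : Int) :
    stepA (addRange pieces t) v = stepA (pieces ++ [t]) v := by
  obtain ⟨d, s, l⟩ := t
  unfold addRange
  by_cases hl : l ≤ 0
  · rw [if_pos hl]
    by_cases hA : ∃ q ∈ pieces, ContV v q
    · rw [stepA_append_match _ _ _ hA]
    · push_neg at hA
      rw [stepA_append_no_match _ _ _ (fun q hq => hA q hq)]
      rw [stepA_eq_find pieces,
        List.find?_eq_none.mpr (fun q hq => by simpa [ContV] using hA q hq)]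
      simp [stepA]
      omega
  · rw [if_neg hl]
    have hinit : SegsGood s (s + l) [] [(s, s + l)] := by
      refine ⟨?_, ?_, ?_, ?_⟩
      · intro ab hab; simp at hab; subst hab; refine ⟨by omega, by omega, by omega⟩
      · simp
      · intro ab hab p hp; simp at hp
      · intro w; simp
    have hsg := segsGood_fold s (s + l) pieces [(s, s + l)] [] h.1 hinit
    rw [List.append_nil] at hsg
    obtain ⟨hb, hpw, hav, hcov⟩ := hsg
    by_cases hA : ∃ q ∈ pieces, ContV v q
    · rw [stepA_append_match _ _ _ hA, stepA_append_match _ _ _ hA]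
    · push_neg at hA
      rw [stepA_append_no_match _ _ _ (fun q hq => hA q hq),
        stepA_append_no_match _ _ _ (fun q hq => hA q hq)]
      by_cases hin : s ≤ v ∧ v < s + l
      · have hex := (hcov v).mpr ⟨hin.1, hin.2, fun p hp => hA p hp⟩
        obtain ⟨ab, hab, hw⟩ := hex
        have hsome : ∃ q ∈ (pieces.foldl subPiece [(s, s + l)]).map
            (fun ab => ((d, s, l).1 + (ab.1 - (d, s, l).2.1), ab.1, ab.2 - ab.1)), ContV v q := by
          refine ⟨(d + (ab.1 - s), ab.1, ab.2 - ab.1),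
            List.mem_map.mpr ⟨ab, hab, rfl⟩, hw.1, by simp; omega⟩
        rw [stepA_eq_find]
        have hiss : (List.find? (fun q => decide (ContV v q))
            ((pieces.foldl subPiece [(s, s + l)]).map
              (fun ab => ((d, s, l).1 + (ab.1 - (d, s, l).2.1), ab.1, ab.2 - ab.1)))).isSome
              = true := List.find?_isSome.mpr (by
          obtain ⟨q, hq, hcq⟩ := hsome
          exact ⟨q, hq, decide_eq_true hcq⟩)
        cases hfq : List.find? (fun q => decide (ContV v q))
            ((pieces.foldl subPiece [(s, s + l)]).map
              (fun ab => ((d, s, l).1 + (ab.1 - (d, s, l).2.1), ab.1, ab.2 - ab.1))) with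
        | none => rw [hfq] at hiss; simp at hiss
        | some q =>
            have hqm := List.mem_of_find?_eq_some hfq
            obtain ⟨ab', hab', rfl⟩ := List.mem_map.mp hqm
            simp [stepA, hin]
            ring
      · rw [stepA_eq_find]
        have hnone : ∀ q ∈ (pieces.foldl subPiece [(s, s + l)]).map
            (fun ab => ((d, s, l).1 + (ab.1 - (d, s, l).2.1), ab.1, ab.2 - ab.1)),
            ¬ (fun q => decide (ContV v q)) q = true := by
          intro q hq
          obtain ⟨ab, hab, rfl⟩ := List.mem_map.mp hq
          have hbb := hb ab hab
          simp only [ContV, decide_eq_true_eq]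
          push_neg
          intro h1
          omega
        rw [List.find?_eq_none.mpr hnone]
        simp [stepA, hin]

theorem flatten_go (m : List (Int × Int × Int)) :
    ∀ pieces, PiecesGood pieces →
      PiecesGood (m.foldl addRange pieces) ∧
      (∀ v, stepA (m.foldl addRange pieces) v = stepA (pieces ++ m) v) := by
  induction m with
  | nil =>
      intro pieces h
      exact ⟨h, fun v => by simp⟩
  | cons t rest ih =>
      intro pieces h
      simp only [List.foldl_cons]
      obtain ⟨hg, hs⟩ := ih (addRange pieces t) (addRange_good pieces t h)
      refine ⟨hg, fun v => ?_⟩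
      rw [hs v]
      rw [stepA_append_congr (addRange pieces t) (pieces ++ [t]) rest v
        (addRange_cover pieces t h) (addRange_sem pieces t h)]
      rw [List.append_assoc]
      rfl

theorem bisectGo_spec (keys : List Int) (v : Int)
    (hsort : List.Pairwise (· ≤ ·) keys) :
    ∀ lo hi, lo ≤ hi → hi ≤ keys.length →
    (∀ j (hj : j < keys.length), j < lo → keys[j] ≤ v) →
    (∀ j (hj : j < keys.length), hi ≤ j → v < keys[j]) →
    bisectGo keys v lo hi ≤ hi ∧
    (∀ j (hj : j < keys.length), j < bisectGo keys v lo hi → keys[j] ≤ v) ∧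
    (∀ j (hj : j < keys.length), bisectGo keys v lo hi ≤ j → v < keys[j]) := by
  have hmono : ∀ i j (hi : i < keys.length) (hj : j < keys.length), i ≤ j → keys[i] ≤ keys[j] := by
    intro i j hi hj hij
    rcases Nat.lt_or_ge i j with h | h
    · exact (List.pairwise_iff_getElem.mp hsort) i j hi hj h
    · have : i = j := by omega
      subst this; exact le_refl _
  intro lo hi
  induction lo, hi using bisectGo.induct keys v with
  | case1 lo hi hlt mid hv ih =>
      intro hle hhi hlow hhigh
      have hmeq : mid = (lo + hi) / 2 := rfl
      have hmid : (lo + hi) / 2 < keys.length := by omega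
      have hv' : v < keys[(lo + hi) / 2] :=
        lt_of_lt_of_eq hv (List.getD_eq_getElem keys 0 hmid)
      have hvL : v < keys.getD ((lo + hi) / 2) 0 := hv
      have heq : bisectGo keys v lo hi = bisectGo keys v lo ((lo + hi) / 2) := by
        rw [bisectGo]; simp only [dif_pos hlt, if_pos hvL]
      rw [heq]
      have hrec := ih (by omega) (by omega) hlow
        (fun j hj hmj => lt_of_lt_of_le hv' (hmono _ j hmid hj (by omega)))
      have h1 : bisectGo keys v lo ((lo + hi) / 2) ≤ (lo + hi) / 2 := hrec.1
      exact ⟨by omega, hrec.2.1, hrec.2.2⟩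
  | case2 lo hi hlt mid hv ih =>
      intro hle hhi hlow hhigh
      have hmeq : mid = (lo + hi) / 2 := rfl
      have hmid : (lo + hi) / 2 < keys.length := by omega
      have hv' : keys[(lo + hi) / 2] ≤ v :=
        not_lt.mp (fun h => hv (lt_of_lt_of_eq h (List.getD_eq_getElem keys 0 hmid).symm))
      have hvL : ¬ v < keys.getD ((lo + hi) / 2) 0 := hv
      have heq : bisectGo keys v lo hi = bisectGo keys v ((lo + hi) / 2 + 1) hi := by
        rw [bisectGo]; simp only [dif_pos hlt, if_neg hvL]
      rw [heq]
      exact ih (by omega) hhi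
        (fun j hj hjm => le_trans (hmono j _ hj hmid (by omega)) hv') hhigh
  | case3 lo hi hlt =>
      intro hle hhi hlow hhigh
      have heq : bisectGo keys v lo hi = lo := by
        rw [bisectGo]; simp [hlt]
      rw [heq]
      exact ⟨hle, fun j hj hjlo => hlow j hj hjlo,
        fun j hj hloj => hhigh j hj (by omega)⟩

-- B's sorted-table binary-search lookup = A's first-match scan, for disjoint positive pieces
theorem lookupB_eq_stepA (rs0 : List (Int × Int × Int)) (v : Int)
    (hpos0 : ∀ t ∈ rs0, (0 : Int) < t.2.2)
    (hdisj : List.Pairwise (fun a b => a.2.1 + a.2.2 ≤ b.2.1 ∨ b.2.1 + b.2.2 ≤ a.2.1) rs0) :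
    lookupB (tableB rs0).1 (tableB rs0).2 v = stepA rs0 v := by
  rw [stepA_eq_find]
  set rs := PySem.List.sorted rs0 (fun t => t.2.1) with hrs
  set keys := rs.map (fun t : Int × Int × Int => t.2.1) with hkeysdef
  have htb : (tableB rs0).1 = rs ∧ (tableB rs0).2 = keys := ⟨rfl, rfl⟩
  rw [htb.1, htb.2]
  have hperm : rs.Perm rs0 := PySem.List.sorted_perm rs0 _ false
  have hpos : ∀ t ∈ rs, (0 : Int) < t.2.2 := fun t ht => hpos0 t (hperm.mem_iff.mp ht)
  have hdisjr : rs.Pairwise (fun a b => a.2.1 + a.2.2 ≤ b.2.1 ∨ b.2.1 + b.2.2 ≤ a.2.1) :=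
    (List.Perm.pairwise_iff (fun h => Or.symm h) hperm).mpr hdisj
  have hsorted : rs.Pairwise (fun a b => a.2.1 ≤ b.2.1) := PySem.List.sorted_pairwise rs0 _
  have hkeys : keys.Pairwise (· ≤ ·) := List.pairwise_map.mpr hsorted
  have hlen : keys.length = rs.length := by simp [hkeysdef]
  obtain ⟨hr_le, hbelow, habove⟩ :=
    bisectGo_spec keys v hkeys 0 keys.length (Nat.zero_le _) (le_refl _)
      (fun j hj h => absurd h (Nat.not_lt_zero j))
      (fun j hj hge => absurd hj (not_lt.mpr hge))
  have hrr : bisectR keys v = bisectGo keys v 0 keys.length := rfl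
  rw [← hrr] at hr_le hbelow habove
  have hkg : ∀ j (hj : j < rs.length), keys[j]'(by omega) = rs[j].2.1 := by
    intro j hj; simp [hkeysdef]
  have hpast : ∀ k j (hk : k < rs.length) (hj : j < rs.length), k < j →
      rs[k].2.1 ≤ v → v < rs[k].2.1 + rs[k].2.2 → v < rs[j].2.1 := by
    intro k j hk hj hkj h1 h2
    have hd := (List.pairwise_iff_getElem.mp hdisjr) k j hk hj hkj
    have hs := (List.pairwise_iff_getElem.mp hsorted) k j hk hj hkj
    have hpj := hpos rs[j] (List.getElem_mem hj)
    rcases hd with hd | hd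
    · omega
    · omega
  cases hfind : rs0.find? (fun t => decide (ContV v t)) with
  | none =>
      have hnone : ∀ t ∈ rs, ¬ (t.2.1 ≤ v ∧ v < t.2.1 + t.2.2) := by
        intro t ht
        have := List.find?_eq_none.mp hfind t (hperm.mem_iff.mp ht)
        simpa [ContV] using this
      by_cases hr0 : bisectR keys v = 0
      · simp [lookupB, hr0]
      · have h1 : 1 ≤ bisectR keys v := by omega
        have hrlen : bisectR keys v ≤ rs.length := by omega
        have hklt : bisectR keys v - 1 < rs.length := by omega
        have hik : ((bisectR keys v : Int) - 1).toNat = bisectR keys v - 1 := by omega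
        have hle : rs[bisectR keys v - 1].2.1 ≤ v := by
          rw [← hkg _ hklt]; exact hbelow _ (by omega) (by omega)
        have hnc := hnone rs[bisectR keys v - 1] (List.getElem_mem hklt)
        have hnlt : ¬ v < rs[bisectR keys v - 1].2.1 + rs[bisectR keys v - 1].2.2 := by
          intro h; exact hnc ⟨hle, h⟩
        simp only [lookupB]
        rw [if_pos (by omega), hik, List.getD_eq_getElem rs (0, 0, 0) hklt, if_neg hnlt]
  | some t =>
      have htP : t ∈ rs0 := List.mem_of_find?_eq_some hfind
      have htc : t.2.1 ≤ v ∧ v < t.2.1 + t.2.2 := by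
        have := List.find?_some hfind
        simpa [ContV] using this
      obtain ⟨k, hk, hkt⟩ := List.getElem_of_mem (hperm.mem_iff.mpr htP)
      have hklt : k < bisectR keys v := by
        by_contra hcon
        have := habove k (by omega) (by omega)
        rw [hkg k hk, hkt] at this
        omega
      have hup : bisectR keys v ≤ k + 1 := by
        by_contra hcon
        have hb := hbelow (k + 1) (by omega) (by omega)
        rw [hkg (k + 1) (by omega)] at hb
        have := hpast k (k + 1) hk (by omega) (by omega)
          (by rw [hkt]; exact htc.1) (by rw [hkt]; exact htc.2)
        omega
      have hik : ((bisectR keys v : Int) - 1).toNat = k := by omega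
      simp only [lookupB]
      rw [if_pos (by omega), hik, List.getD_eq_getElem rs (0, 0, 0) hk, hkt,
        if_pos htc.2]
      ring

theorem minloc_spec' (seeds : List Int) (maps : List (List (Int × Int × Int)))
    (hpre : Pre_minloc seeds maps) : minloc seeds maps = minloc_alt seeds maps := by
  obtain ⟨s0, tl, rfl⟩ := List.exists_cons_of_ne_nil hpre
  have hone : ∀ (m : List (Int × Int × Int)) (v : Int),
      lookupB (tableB (flatten m)).1 (tableB (flatten m)).2 v = stepA m v := by
    intro m v
    have hgood : PiecesGood ([] : List (Int × Int × Int)) := ⟨by simp, by simp⟩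
    obtain ⟨hg, hs⟩ := flatten_go m [] hgood
    rw [lookupB_eq_stepA (flatten m) v hg.1 hg.2]
    simpa using hs v
  have hstep : ∀ (ms : List (List (Int × Int × Int))) (v : Int),
      (ms.map (fun m => tableB (flatten m))).foldl (fun v tb => lookupB tb.1 tb.2 v) v
        = ms.foldl (fun seed m => stepA m seed) v := by
    intro ms
    induction ms with
    | nil => intro v; rfl
    | cons m rest ih =>
        intro v
        simp only [List.map_cons, List.foldl_cons]
        rw [hone m v]
        exact ih _
  have hfun : (fun (best v0 : Int) =>
        let v := (maps.map (fun m => tableB (flatten m))).foldl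
          (fun v tb => lookupB tb.1 tb.2 v) v0
        if v < best then v else best)
      = (fun (sol seed0 : Int) =>
        let seed := maps.foldl (fun seed m => stepA m seed) seed0
        if sol < seed then sol else seed) := by
    funext b x
    simp only [hstep maps x]
    split_ifs <;> omega
  unfold minloc minloc_alt
  simp only [PySem.List.pyGet?_zero_cons, hfun]

-- ===== VERDICT (by name: the statement is the Claim_ definition above) =====
theorem minloc_spec : Claim_equal_minloc := by
  intro seeds maps _ hpre
  exact minloc_spec' seeds maps hpre
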